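-- pv_equiv track=rewrite | github.com/phucleit96/DSA-Codecademy | Recursion/Recursion_Challenge.py | wrap_string
-- ===== SOURCE A (Python) =====
-- def wrap_string(string, n):
--     """
--     Wraps a given string within angled brackets '<' and '>' recursively 'n' times.
--
--     Args:
--     - string: The string to be wrapped.
--     - n: The number of times the string is wrapped within brackets.
--
--     Returns:
--     - The string wrapped 'n' times within angled brackets.
--     """
--     result = ""
--
--     # Base case: If 'n' is less than or equal to 0, return the original string as is
--     if n <= 0:
--         return string
--
--     # Recursive case: Wrap the string within '<' and '>' and concatenate the result
--     result += "<"
--     result += wrap_string(string, n - 1)  # Recursively wrap the string 'n-1' times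
--     result += ">"
--
--     return result
-- ===== SOURCE B (Python) =====
-- def wrap_string(string, n):
--     result = string
--     while n > 0:
--         result = '<' + result + '>'
--         n -= 1
--     return result
-- ===== Notes on version B (the rewrite author's own statement) =====
-- stated objective: simpler
-- what changed: Replaces the recursion with an iterative while-loop that builds the wrapped string inner-to-outer in an accumulator.
import Mathlib
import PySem

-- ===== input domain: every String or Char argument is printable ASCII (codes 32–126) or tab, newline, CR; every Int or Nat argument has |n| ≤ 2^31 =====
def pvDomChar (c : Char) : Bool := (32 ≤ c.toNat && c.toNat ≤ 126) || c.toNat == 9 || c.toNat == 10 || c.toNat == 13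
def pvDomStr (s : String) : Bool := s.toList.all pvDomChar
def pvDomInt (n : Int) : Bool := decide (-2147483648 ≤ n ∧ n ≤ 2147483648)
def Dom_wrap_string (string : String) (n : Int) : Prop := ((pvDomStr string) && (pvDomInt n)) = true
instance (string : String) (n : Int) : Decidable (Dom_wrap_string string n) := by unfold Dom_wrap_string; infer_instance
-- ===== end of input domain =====

-- B replaces the recursion by an iterative while-loop accumulating inner-to-outer (objective: simpler).

-- ===== PORT A =====
def wrap_string (string : String) (n : Int) : String :=
  if n ≤ 0 then string
  else "<" ++ wrap_string string (n - 1) ++ ">"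
termination_by n.toNat
decreasing_by omega

-- ===== PORT B =====
-- the while-loop of Source B: state (result, n)
def wrapLoop (result : String) (n : Int) : String :=
  if n > 0 then wrapLoop ("<" ++ result ++ ">") (n - 1) else result
termination_by n.toNat
decreasing_by omega

def wrap_string_alt (string : String) (n : Int) : String :=
  wrapLoop string n

-- ===== PRECONDITION & SPEC =====
-- Pre_ excludes n ≥ 998, where Python A raises RecursionError (CPython's default recursion limit);
-- A returns normally on every admitted input.
def Pre_wrap_string (string : String) (n : Int) : Prop := n ≤ 997
instance (string : String) (n : Int) : Decidable (Pre_wrap_string string n) := by unfold Pre_wrap_string; infer_instance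
def pvWitness_wrap_string : String × Int := ("hi", 2)

def Spec_wrap_string (string : String) (n : Int) (out : String) : Prop := out = wrap_string_alt string n
instance (string : String) (n : Int) (out : String) : Decidable (Spec_wrap_string string n out) := by unfold Spec_wrap_string; infer_instance

-- ===== CLAIM (what is proved, stated in full; the proofs are below) =====
def Claim_equal_wrap_string : Prop := ∀ (string : String) (n : Int), Dom_wrap_string string n → Pre_wrap_string string n → Spec_wrap_string string n (wrap_string string n)

-- ===== LEMMAS AND PROOFS =====

-- pushing one wrapping layer through the loop (fuel-bounded induction on n.toNat)
theorem wrapLoop_wrap (k : Nat) : ∀ (n : Int), n.toNat ≤ k → ∀ (s : String),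
    wrapLoop ("<" ++ s ++ ">") n = "<" ++ wrapLoop s n ++ ">" := by
  induction k with
  | zero =>
    intro n hn s
    have h : ¬ n > 0 := by omega
    rw [wrapLoop]
    conv_rhs => rw [wrapLoop]
    rw [if_neg h, if_neg h]
  | succ k ih =>
    intro n hn s
    by_cases h : n > 0
    · rw [wrapLoop]
      conv_rhs => rw [wrapLoop]
      rw [if_pos h, if_pos h]
      exact ih (n - 1) (by omega) ("<" ++ s ++ ">")
    · rw [wrapLoop]
      conv_rhs => rw [wrapLoop]
      rw [if_neg h, if_neg h]

theorem wrap_eq (k : Nat) : ∀ (n : Int), n.toNat ≤ k → ∀ (s : String),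
    wrap_string s n = wrapLoop s n := by
  induction k with
  | zero =>
    intro n hn s
    have h : n ≤ 0 := by omega
    rw [wrap_string]
    conv_rhs => rw [wrapLoop]
    rw [if_pos h, if_neg (by omega)]
  | succ k ih =>
    intro n hn s
    by_cases h : n ≤ 0
    · rw [wrap_string]
      conv_rhs => rw [wrapLoop]
      rw [if_pos h, if_neg (by omega)]
    · rw [wrap_string]
      conv_rhs => rw [wrapLoop]
      rw [if_neg h, if_pos (by omega), ih (n - 1) (by omega) s,
        wrapLoop_wrap n.toNat (n - 1) (by omega) s]

-- ===== VERDICT (by name: the statement is the Claim_ definition above) =====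
theorem wrap_string_spec : Claim_equal_wrap_string := by
  intro s n _ _
  unfold Spec_wrap_string wrap_string_alt
  exact wrap_eq n.toNat n le_rfl s
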